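-- pv_equiv track=rewrite | github.com/TheKingXion/Carioca | backend/game_logic.py | verificar_secuencia_con_comodines
-- ===== SOURCE A (Python) =====
-- from typing import List, Dict, Tuple, Any
--
-- def verificar_secuencia_con_comodines(valores: List[int], comodines: int) -> bool:
--     """
--     Verifica si los valores pueden formar una secuencia usando comodines
--     """
--     if not valores and comodines >= 3:
--         return True
--
--     if len(valores) == 0:
--         return False
--
--     # Eliminar duplicados y ordenar
--     valores_unicos = sorted(set(valores))
--
--     # Calcular huecos en la secuencia
--     huecos = 0
--     for i in range(1, len(valores_unicos)):
--         huecos += valores_unicos[i] - valores_unicos[i-1] - 1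
--
--     # Los comodines deben cubrir los huecos y completar al menos 3 cartas
--     total_cartas = len(valores) + comodines
--     return total_cartas >= 3 and comodines >= huecos
-- ===== SOURCE B (Python) =====
-- def verificar_secuencia_con_comodines(valores, comodines):
--     if not valores:
--         return comodines >= 3
--     huecos = max(valores) - min(valores) - (len(set(valores)) - 1)
--     return len(valores) + comodines >= 3 and comodines >= huecos
-- ===== Notes on version B (the rewrite author's own statement) =====
-- stated objective: faster
-- what changed: Replaces sort-then-scan over the deduplicated values by a single-pass max/min/unique-count computation: gaps = max - min - (unique_count - 1), so the O(n log n) sort and the adjacent-difference loop disappear.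
import Mathlib
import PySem

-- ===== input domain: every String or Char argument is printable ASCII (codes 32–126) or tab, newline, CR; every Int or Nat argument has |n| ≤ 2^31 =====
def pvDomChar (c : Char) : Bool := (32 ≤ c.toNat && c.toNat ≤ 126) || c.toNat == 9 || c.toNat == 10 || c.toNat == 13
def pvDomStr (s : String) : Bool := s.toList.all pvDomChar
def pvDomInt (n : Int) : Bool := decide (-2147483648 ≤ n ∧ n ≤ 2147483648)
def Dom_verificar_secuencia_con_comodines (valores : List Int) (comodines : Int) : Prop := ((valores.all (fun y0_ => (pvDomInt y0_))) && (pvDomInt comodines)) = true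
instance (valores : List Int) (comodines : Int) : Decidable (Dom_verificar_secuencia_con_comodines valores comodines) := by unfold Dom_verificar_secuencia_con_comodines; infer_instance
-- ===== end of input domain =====

-- B replaces A's sort of the deduplicated values and adjacent-difference loop by a
-- single pass: gaps = max - min - (unique_count - 1). Same return value on every input.

-- ===== PORT A =====
def verificar_secuencia_con_comodines (valores : List Int) (comodines : Int) : Bool :=
  if valores = [] ∧ comodines ≥ 3 then true
  else if valores.length = 0 then false
  else
    let valores_unicos := PySem.List.sorted (PySem.Set.ofList valores) (fun x => x) false
    let huecos := (PySem.List.pyRange 1 (valores_unicos.length : Int) 1).foldl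
      (fun acc i => acc + (PySem.List.pyGetD valores_unicos i 0
                           - PySem.List.pyGetD valores_unicos (i - 1) 0 - 1)) 0
    let total_cartas := (valores.length : Int) + comodines
    decide (total_cartas ≥ 3 ∧ comodines ≥ huecos)

-- ===== PORT B =====
def verificar_secuencia_con_comodines_alt (valores : List Int) (comodines : Int) : Bool :=
  match valores with
  | [] => decide (comodines ≥ 3)
  | v :: vs =>
    -- max(valores) / min(valores) as the running-max/min loops (PySem.List.max?_id_cons / min?_id_cons)
    let mx := vs.foldl max v
    let mn := vs.foldl min v
    let huecos := mx - mn - (((PySem.Set.ofList (v :: vs)).length : Int) - 1)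
    decide (((v :: vs).length : Int) + comodines ≥ 3 ∧ comodines ≥ huecos)

-- ===== PRECONDITION & SPEC =====
def Spec_verificar_secuencia_con_comodines (valores : List Int) (comodines : Int) (out : Bool) : Prop := out = verificar_secuencia_con_comodines_alt valores comodines
instance (valores : List Int) (comodines : Int) (out : Bool) : Decidable (Spec_verificar_secuencia_con_comodines valores comodines out) := by unfold Spec_verificar_secuencia_con_comodines; infer_instance

-- ===== CLAIM (what is proved, stated in full; the proofs are below) =====
def Claim_equal_verificar_secuencia_con_comodines : Prop := ∀ (valores : List Int) (comodines : Int), Dom_verificar_secuencia_con_comodines valores comodines → Spec_verificar_secuencia_con_comodines valores comodines (verificar_secuencia_con_comodines valores comodines)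

-- ===== LEMMAS AND PROOFS =====

-- telescoping: A's adjacent-difference loop over the sorted list a :: t sums to last - a - |t|
theorem hueFold_eq (t : List Int) : ∀ (a c : Int),
  (PySem.List.pyRange 1 ((a :: t).length : Int) 1).foldl
    (fun acc i => acc + (PySem.List.pyGetD (a :: t) i 0 - PySem.List.pyGetD (a :: t) (i - 1) 0 - 1)) c
  = c + ((a :: t).getLast (by simp) - a - (t.length : Int)) := by
  induction t with
  | nil =>
    intro a c
    rw [PySem.List.pyRange_one_eq_nil (by simp)]
    simp
  | cons b t' ih =>
    intro a c
    have hlen : ((a :: b :: t').length : Int) = (t'.length : Int) + 2 := by simp; ring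
    rw [hlen, PySem.List.pyRange_one_cons (by omega)]
    simp only [List.foldl_cons]
    have h1 : PySem.List.pyGetD (a :: b :: t') 1 0 = b := by
      simp [PySem.List.pyGetD]
    have h0 : PySem.List.pyGetD (a :: b :: t') (1 - 1) 0 = a := by
      norm_num [PySem.List.pyGetD_zero_cons]
    rw [h1, h0]
    -- shift the range: pyRange 2 (t'.length+2) 1 vs pyRange 1 (t'.length+1) 1
    have hsh : (PySem.List.pyRange (1+1) ((t'.length : Int) + 2) 1).foldl
        (fun acc i => acc + (PySem.List.pyGetD (a :: b :: t') i 0 - PySem.List.pyGetD (a :: b :: t') (i - 1) 0 - 1))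
        (c + (b - a - 1))
      = (PySem.List.pyRange 1 ((b :: t').length : Int) 1).foldl
        (fun acc i => acc + (PySem.List.pyGetD (b :: t') i 0 - PySem.List.pyGetD (b :: t') (i - 1) 0 - 1))
        (c + (b - a - 1)) := by
      rw [PySem.List.pyRange_one, PySem.List.pyRange_one, List.foldl_map, List.foldl_map]
      have hn : (((t'.length : Int) + 2) - (1+1)).toNat = (((b :: t').length : Int) - 1).toNat := by
        simp
      rw [hn]
      apply PySem.List.foldl_congr_mem
      intro acc k hk
      have e1 : (1 + 1 : Int) + (k : Int) = ((k + 2 : Nat) : Int) := by push_cast; ring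
      have e2 : (1 + 1 : Int) + (k : Int) - 1 = ((k + 1 : Nat) : Int) := by push_cast; ring
      have e3 : (1 : Int) + (k : Int) = ((k + 1 : Nat) : Int) := by push_cast; ring
      have e4 : (1 : Int) + (k : Int) - 1 = ((k : Nat) : Int) := by ring
      rw [e2, e1, e4, e3, PySem.List.pyGetD_natCast, PySem.List.pyGetD_natCast,
          PySem.List.pyGetD_natCast, PySem.List.pyGetD_natCast]
      simp [List.getD]
    rw [show (2 : Int) = 1 + 1 from rfl] at *
    rw [hsh, ih b (c + (b - a - 1))]
    have : (a :: b :: t').getLast (by simp) = (b :: t').getLast (by simp) := by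
      simp [List.getLast]
    rw [this]
    have hl2 : (((b :: t').length : Int)) = (t'.length : Int) + 1 := by simp
    rw [hl2]; ring

-- every element of a (·<·)-pairwise list is ≤ its last element
theorem le_getLast_of_pairwise (l : List Int) (h : l.Pairwise (· < ·)) (hne : l ≠ []) :
    ∀ y ∈ l, y ≤ l.getLast hne := by
  induction l with
  | nil => simp
  | cons a t ih =>
    intro y hy
    rcases List.mem_cons.mp hy with rfl | hyt
    · cases t with
      | nil => simp
      | cons b t' =>
        have hb : y < b := (List.pairwise_cons.mp h).1 b (by simp)
        have := ih (List.pairwise_cons.mp h).2 (by simp) b (by simp)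
        calc y ≤ b := le_of_lt hb
          _ ≤ _ := by simpa [List.getLast] using this
    · cases t with
      | nil => simp at hyt
      | cons b t' =>
        have := ih (List.pairwise_cons.mp h).2 (by simp) y hyt
        simpa [List.getLast] using this

theorem verificar_secuencia_con_comodines_spec : Claim_equal_verificar_secuencia_con_comodines := by
  unfold Claim_equal_verificar_secuencia_con_comodines Spec_verificar_secuencia_con_comodines
  intro valores comodines _
  match valores with
  | [] =>
    by_cases h : comodines ≥ 3 <;> simp [verificar_secuencia_con_comodines, verificar_secuencia_con_comodines_alt, h]
  | v :: vs =>
    simp only [verificar_secuencia_con_comodines, verificar_secuencia_con_comodines_alt]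
    rw [if_neg (by simp), if_neg (by simp)]
    -- name the sorted dedup list
    set s := PySem.List.sorted (PySem.Set.ofList (v :: vs)) (fun x => x) false with hs
    have hsne : s ≠ [] := by
      rw [hs, Ne, PySem.List.sorted_eq_nil_iff]
      intro hc
      have : v ∈ PySem.Set.ofList (v :: vs) := (PySem.Set.mem_ofList _ _).mpr (by simp)
      simp [hc] at this
    obtain ⟨a, t, hat⟩ := List.exists_cons_of_ne_nil hsne
    -- membership of s = membership of (v :: vs)
    have hperm : s.Perm (PySem.Set.ofList (v :: vs)) := PySem.List.sorted_perm _ _ _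
    have hmem : ∀ y : Int, y ∈ s ↔ y ∈ v :: vs := by
      intro y
      rw [hperm.mem_iff]; exact PySem.Set.mem_ofList _ _
    have hpw : s.Pairwise (· < ·) := PySem.List.sorted_ofList_pairwise_lt (v :: vs)
    -- last of s = foldl max
    have hmaxmem : vs.foldl max v ∈ v :: vs := by
      rcases PySem.List.foldl_max_mem vs v with h | h
      · simp [h]
      · simp [h]
    have hmaxub : ∀ y ∈ v :: vs, y ≤ vs.foldl max v := by
      intro y hy
      rcases List.mem_cons.mp hy with rfl | hyt
      · exact (PySem.List.le_foldl_max vs y).1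
      · exact (PySem.List.le_foldl_max vs v).2 y hyt
    have hlast : s.getLast hsne = vs.foldl max v := by
      apply le_antisymm
      · exact hmaxub _ ((hmem _).mp (List.getLast_mem hsne))
      · exact le_getLast_of_pairwise s hpw hsne _ ((hmem _).mpr hmaxmem)
    -- head of s = foldl min
    have hminmem : vs.foldl min v ∈ v :: vs := by
      rcases PySem.List.foldl_min_mem vs v with h | h
      · simp [h]
      · simp [h]
    have hminlb : ∀ y ∈ v :: vs, vs.foldl min v ≤ y := by
      intro y hy
      rcases List.mem_cons.mp hy with rfl | hyt
      · exact (PySem.List.foldl_min_le vs y).1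
      · exact (PySem.List.foldl_min_le vs v).2 y hyt
    have hhead : a = vs.foldl min v := by
      have hle : ∀ y ∈ PySem.Set.ofList (v :: vs), a ≤ y := by
        have hsort : PySem.List.sorted (PySem.Set.ofList (v :: vs)) (fun x => x) = a :: t := by
          rw [← hs]; exact hat
        have := PySem.List.key_head_sorted_le (PySem.Set.ofList (v :: vs)) (fun x : Int => x) hsort
        simpa using this
      apply le_antisymm
      · exact hle _ ((PySem.Set.mem_ofList _ _).mpr hminmem)
      · exact hminlb a ((hmem a).mp (by simp [hat]))
    -- length
    have hlen : s.length = (PySem.Set.ofList (v :: vs)).length := hperm.length_eq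
    -- huecos equal
    have hfold := hueFold_eq t a 0
    rw [hat]
    rw [hfold]
    have hgl : (a :: t).getLast (by simp) = s.getLast hsne := by
      congr 1
      exact hat.symm
    rw [hgl, hlast, hhead]
    have htlen : (t.length : Int) = ((PySem.Set.ofList (v :: vs)).length : Int) - 1 := by
      have : t.length + 1 = (PySem.Set.ofList (v :: vs)).length := by
        rw [← hlen, hat]; simp
      omega
    rw [htlen]
    ring_nf
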